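-- pv_equiv track=rewrite | github.com/pibesdesistemas/AGIP | dv-PATENTE.py | dv
-- ===== SOURCE A (Python) =====
-- def dv(patente):
--   number_by_letter = {
--       "A": "14",
--       "B": "01",
--       "C": "00",
--       "D": "16",
--       "E": "05",
--       "F": "20",
--       "G": "19",
--       "H": "09",
--       "I": "24",
--       "J": "07",
--       "K": "21",
--       "L": "08",
--       "M": "04",
--       "N": "13",
--       "O": "25",
--       "P": "22",
--       "Q": "18",
--       "R": "10",
--       "S": "02",
--       "T": "06",
--       "U": "12",
--       "V": "23",
--       "W": "11",
--       "X": "03",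
--       "Y": "15",
--       "Z": "17",
--   }
--
--   patente = patente.upper().replace(" ", "").replace("-", "")
--
--   numbers = patente
--   for letter, number in number_by_letter.items():
--     numbers = numbers.replace(letter, number)
--
--   num1 = 0
--   num2 = 0
--
--   for i, digit in enumerate(numbers):
--     if i % 2 == 0:
--       num1 += int(digit)
--     else:
--       num2 += int(digit)
--
--   num1 = numero(num1)
--   num2 = numero(num2)
--
--   return str(num1) + str(num2)
--
-- def numero(n):
--   while n > 9:
--     n = sum(int(d) for d in str(n))
--   return n
-- ===== SOURCE B (Python) =====
-- def dv(patente):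
--   number_by_letter = {
--       "A": "14", "B": "01", "C": "00", "D": "16", "E": "05", "F": "20",
--       "G": "19", "H": "09", "I": "24", "J": "07", "K": "21", "L": "08",
--       "M": "04", "N": "13", "O": "25", "P": "22", "Q": "18", "R": "10",
--       "S": "02", "T": "06", "U": "12", "V": "23", "W": "11", "X": "03",
--       "Y": "15", "Z": "17",
--   }
--
--   patente = patente.upper().replace(" ", "").replace("-", "")
--
--   # One fused pass: expand each character via a dict lookup and add its
--   # digits straight into the two parity buckets, tracking the position.
--   num1 = 0
--   num2 = 0
--   pos = 0
--   for c in patente: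
--     for d in number_by_letter.get(c, c):
--       if pos % 2 == 0:
--         num1 += int(d)
--       else:
--         num2 += int(d)
--       pos += 1
--
--   return str(numero(num1)) + str(numero(num2))
--
-- def numero(n):
--   while n > 9:
--     n = sum(int(d) for d in str(n))
--   return n
-- ===== Notes on version B (the rewrite author's own statement) =====
-- stated objective: alternative
-- what changed: Instead of 26 whole-string replace passes followed by a separate enumerate loop over the expanded digit string, B makes one fused pass over the normalized plate, expanding each character by a dict lookup and adding its digits directly into the two parity buckets while tracking the position; it trades A's repeated C-level replace scans for a single Python-level traversal with no intermediate strings.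
import Mathlib
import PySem

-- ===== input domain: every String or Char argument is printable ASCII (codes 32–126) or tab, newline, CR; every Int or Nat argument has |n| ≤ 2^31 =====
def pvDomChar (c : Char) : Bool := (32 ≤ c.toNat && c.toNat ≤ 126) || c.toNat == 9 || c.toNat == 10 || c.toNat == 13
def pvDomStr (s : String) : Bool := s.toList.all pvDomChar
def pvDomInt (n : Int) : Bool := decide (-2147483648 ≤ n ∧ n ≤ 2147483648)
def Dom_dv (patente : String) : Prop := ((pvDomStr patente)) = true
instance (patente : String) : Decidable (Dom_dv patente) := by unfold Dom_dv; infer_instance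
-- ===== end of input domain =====

-- B replaces A's 26 whole-string replace passes (plus a separate indexed digit loop)
-- by one fused pass that expands each character via a dict lookup and adds its digits
-- straight into the two parity buckets (objective: alternative single-pass algorithm,
-- no intermediate strings).  Both Python files define the same table and the same
-- `numero` helper, so the table and `numero` are shared by the two ports.

-- ===== PORT A =====
-- the dict literal from the Python source (keys are 1-character strings)
def dvDict : PySem.Dict String String := PySem.Dict.ofList
  [("A", "14"), ("B", "01"), ("C", "00"), ("D", "16"), ("E", "05"), ("F", "20"),
   ("G", "19"), ("H", "09"), ("I", "24"), ("J", "07"), ("K", "21"), ("L", "08"),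
   ("M", "04"), ("N", "13"), ("O", "25"), ("P", "22"), ("Q", "18"), ("R", "10"),
   ("S", "02"), ("T", "06"), ("U", "12"), ("V", "23"), ("W", "11"), ("X", "03"),
   ("Y", "15"), ("Z", "17")]

-- int(d) for a single character d: ValueError = none (those inputs are outside Pre_dv);
-- the default 0 is never reached inside Pre_dv.
def dvDigit (c : Char) : Int := (PySem.Int.ofChars? [c]).getD 0

-- sum(int(d) for d in str(n))
def dvDigitSum (n : Int) : Int := ((PySem.Int.toChars n).map dvDigit).sum

-- `while n > 9: n = sum(int(d) for d in str(n))`, ported with fuel n.toNat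
-- (the digit sum of an n > 9 is strictly smaller, so n.toNat iterations always suffice)
def numeroGo : Nat → Int → Int
  | 0, n => n
  | f + 1, n => if n > 9 then numeroGo f (dvDigitSum n) else n

def numero (n : Int) : Int := numeroGo n.toNat n

-- the body of A's `for i, digit in enumerate(numbers)` loop
def dvLoopA (s : Int × Int) (idx : Int × Char) : Int × Int :=
  if PySem.Int.mod idx.1 2 == 0 then (s.1 + dvDigit idx.2, s.2)
  else (s.1, s.2 + dvDigit idx.2)

def dv (patente : String) : String :=
  let p := PySem.Str.replace (PySem.Str.replace (PySem.Str.upper patente) " " "") "-" ""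
  let numbers := (PySem.Dict.items dvDict).foldl
    (fun ns kv => PySem.Str.replace ns kv.1 kv.2) p
  let s := (PySem.List.enumerate numbers.toList 0).foldl dvLoopA (0, 0)
  PySem.Int.toStr (numero s.1) ++ PySem.Int.toStr (numero s.2)

-- ===== PORT B =====
-- B's dict, keyed by the character itself (a Python character IS its 1-char string)
def dvTableC : List (Char × String) :=
  [('A', "14"), ('B', "01"), ('C', "00"), ('D', "16"), ('E', "05"), ('F', "20"),
   ('G', "19"), ('H', "09"), ('I', "24"), ('J', "07"), ('K', "21"), ('L', "08"),
   ('M', "04"), ('N', "13"), ('O', "25"), ('P', "22"), ('Q', "18"), ('R', "10"),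
   ('S', "02"), ('T', "06"), ('U', "12"), ('V', "23"), ('W', "11"), ('X', "03"),
   ('Y', "15"), ('Z', "17")]

def dvDictC : PySem.Dict Char String := PySem.Dict.ofList dvTableC

-- the body of B's inner `for d in number_by_letter.get(c, c)` loop; state (num1, num2, pos)
def dvLoopB (st : Int × Int × Int) (d : Char) : Int × Int × Int :=
  if PySem.Int.mod st.2.2 2 == 0 then (st.1 + dvDigit d, st.2.1, st.2.2 + 1)
  else (st.1, st.2.1 + dvDigit d, st.2.2 + 1)

def dv_alt (patente : String) : String :=
  let p := PySem.Str.replace (PySem.Str.replace (PySem.Str.upper patente) " " "") "-" ""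
  let st := p.toList.foldl
    (fun st c => ((PySem.Dict.get? dvDictC c).getD (String.singleton c)).toList.foldl dvLoopB st)
    ((0, 0, 0) : Int × Int × Int)
  PySem.Int.toStr (numero st.1) ++ PySem.Int.toStr (numero st.2.1)

-- ===== PRECONDITION & SPEC =====
-- Pre_dv excludes exactly the inputs on which Python's int(d) raises ValueError:
-- after upper() and removal of spaces/hyphens, every remaining character must be a
-- letter (expanded to digits by the table) or a digit.
def Pre_dv (patente : String) : Prop :=
  (patente.toList.all (fun c =>
    c == ' ' || c == '-' || PySem.Chars.isdigit c || PySem.Chars.isalpha c)) = true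
instance (patente : String) : Decidable (Pre_dv patente) := by unfold Pre_dv; infer_instance

def pvWitness_dv : String := "AB 123-CD"

def Spec_dv (patente : String) (out : String) : Prop := out = dv_alt patente
instance (patente : String) (out : String) : Decidable (Spec_dv patente out) := by unfold Spec_dv; infer_instance

-- ===== CLAIM (what is proved, stated in full; the proofs are below) =====
def Claim_equal_dv : Prop := ∀ (patente : String), Dom_dv patente → Pre_dv patente → Spec_dv patente (dv patente)

-- ===== LEMMAS AND PROOFS =====

-- what one character contributes to the expanded digit string, B style
def dvExpand (ps : List (Char × String)) (c : Char) : List Char :=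
  (((PySem.Dict.mk ps).get? c).getD (String.singleton c)).toList

theorem dvDict_get?_mk_eq_none {ps : List (Char × String)} {c : Char}
    (h : ∀ kv ∈ ps, kv.1 ≠ c) : (PySem.Dict.mk ps).get? c = none := by
  induction ps with
  | nil => rfl
  | cons kv r ih =>
    rw [show (PySem.Dict.mk (kv :: r) : PySem.Dict Char String) = PySem.Dict.mk ((kv.1, kv.2) :: r) by rfl,
        PySem.Dict.get?_mk_cons]
    have h1 : kv.1 ≠ c := h kv (by simp)
    simp [h1]
    exact ih (fun p hp => h p (by simp [hp]))

-- replacing a single character a by v maps each character independently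
theorem replace_go_single (a : Char) (v : List Char) :
    ∀ (fuel : Nat) (s acc : List Char), s.length ≤ fuel →
      PySem.Chars.replace.go [a] v fuel s acc =
        acc.reverse ++ s.flatMap (fun c => if c = a then v else [c]) := by
  intro fuel
  induction fuel with
  | zero =>
    intro s acc h
    have : s = [] := List.eq_nil_of_length_eq_zero (Nat.le_zero.mp h)
    subst this; simp [PySem.Chars.replace.go]
  | succ f ih =>
    intro s acc h
    cases s with
    | nil => simp [PySem.Chars.replace.go]
    | cons c t =>
      by_cases hc : c = a
      · subst hc
        have hpre : List.isPrefixOf [c] (c :: t) = true := by simp [List.isPrefixOf]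
        simp only [PySem.Chars.replace.go, hpre, if_true]
        rw [ih _ _ (by simpa using Nat.le_of_succ_le_succ h)]
        simp
      · have hpre : List.isPrefixOf [a] (c :: t) = false := by
          simp [List.isPrefixOf]; exact fun hx => absurd hx.symm hc
        simp only [PySem.Chars.replace.go, hpre]
        rw [if_neg (by simp), ih _ _ (by simpa using Nat.le_of_succ_le_succ h)]
        simp [hc]

theorem replace_single (a : Char) (v s : List Char) :
    PySem.Chars.replace s [a] v = s.flatMap (fun c => if c = a then v else [c]) := by
  rw [PySem.Chars.replace]
  simp only [List.isEmpty_cons, Bool.false_eq_true, if_false]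
  simpa using replace_go_single a v s.length s [] (le_refl _)

-- the sequential single-character replace passes amount to one per-character expansion,
-- because no replacement value contains any key
theorem chain_eq (ps : List (Char × String))
    (hps : ∀ kv ∈ ps, ∀ d ∈ kv.2.toList, ∀ kv' ∈ ps, kv'.1 ≠ d) :
    ∀ s : List Char,
      ps.foldl (fun ns kv => PySem.Chars.replace ns [kv.1] kv.2.toList) s =
        s.flatMap (dvExpand ps) := by
  induction ps with
  | nil =>
    intro s
    simp only [List.foldl_nil]
    have : ∀ c, dvExpand [] c = [c] := by
      intro c; simp [dvExpand, PySem.Dict.get?, String.toList_singleton]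
    rw [show s.flatMap (dvExpand []) = s.flatMap (fun c => [c]) from
      List.flatMap_congr (fun c _ => this c)]
    exact (List.flatMap_singleton' s).symm
  | cons kv r ih =>
    intro s
    obtain ⟨a, v⟩ := kv
    have hr : ∀ p ∈ r, ∀ d ∈ p.2.toList, ∀ p' ∈ r, p'.1 ≠ d := by
      intro p hp d hd p' hp'
      exact hps p (by simp [hp]) d hd p' (by simp [hp'])
    rw [List.foldl_cons]
    rw [show PySem.Chars.replace s [(a, v).1] (a, v).2.toList =
      s.flatMap (fun c => if c = a then v.toList else [c]) from replace_single a v.toList s]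
    rw [ih hr, List.flatMap_assoc]
    apply List.flatMap_congr
    intro c _
    by_cases hc : c = a
    · subst hc
      have hv : ∀ d ∈ v.toList, dvExpand r d = [d] := by
        intro d hd
        have : ∀ p ∈ r, p.1 ≠ d := by
          intro p hp
          exact hps (c, v) (by simp) d hd p (by simp [hp])
        simp [dvExpand, dvDict_get?_mk_eq_none this, String.toList_singleton]
      have : v.toList.flatMap (dvExpand r) = v.toList.flatMap (fun d => [d]) :=
        List.flatMap_congr (fun d hd => hv d hd)
      rw [if_pos rfl, this, List.flatMap_singleton']
      simp [dvExpand, PySem.Dict.get?_mk_cons]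
    · rw [if_neg hc]
      simp only [List.flatMap_cons, List.flatMap_nil, List.append_nil]
      simp [dvExpand, PySem.Dict.get?_mk_cons, Ne.symm hc]

theorem dvTableC_sound_bool :
    (dvTableC.all (fun kv => kv.2.toList.all (fun d => dvTableC.all (fun kv' => kv'.1 != d)))) = true := by rfl

theorem dvTableC_sound :
    ∀ kv ∈ dvTableC, ∀ d ∈ kv.2.toList, ∀ kv' ∈ dvTableC, kv'.1 ≠ d := by
  have h := dvTableC_sound_bool
  rw [List.all_eq_true] at h
  intro kv hkv d hd kv' hkv'
  have h2 := h kv hkv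
  rw [List.all_eq_true] at h2
  have h3 := h2 d hd
  rw [List.all_eq_true] at h3
  simpa using h3 kv' hkv'

-- B's inner loop over a chunk equals A's indexed loop over that chunk
theorem inner_eq (xs : List Char) :
    ∀ (n1 n2 i : Int),
      xs.foldl dvLoopB (n1, n2, i) =
        (((PySem.List.enumerate xs i).foldl dvLoopA (n1, n2)).1,
         ((PySem.List.enumerate xs i).foldl dvLoopA (n1, n2)).2,
         i + xs.length) := by
  induction xs with
  | nil => intro n1 n2 i; simp [PySem.List.enumerate]
  | cons c t ih =>
    intro n1 n2 i
    rw [PySem.List.enumerate_cons]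
    cases h : (PySem.Int.mod i 2 == 0) with
    | false =>
      simp only [List.foldl_cons, dvLoopA, dvLoopB, h, Bool.false_eq_true, if_false]
      rw [ih]
      simp only [Prod.mk.injEq]
      refine ⟨trivial, trivial, ?_⟩
      push_cast [List.length_cons]; ring
    | true =>
      simp only [List.foldl_cons, dvLoopA, dvLoopB, h, if_true]
      rw [ih]
      simp only [Prod.mk.injEq]
      refine ⟨trivial, trivial, ?_⟩
      push_cast [List.length_cons]; ring

-- B's fused pass over the plate equals A's indexed loop over the expanded digit string
theorem outer_eq (mm : Char → List Char) (s : List Char) :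
    ∀ (n1 n2 i : Int),
      s.foldl (fun st c => (mm c).foldl dvLoopB st) (n1, n2, i) =
        (((PySem.List.enumerate (s.flatMap mm) i).foldl dvLoopA (n1, n2)).1,
         ((PySem.List.enumerate (s.flatMap mm) i).foldl dvLoopA (n1, n2)).2,
         i + (s.flatMap mm).length) := by
  induction s with
  | nil => intro n1 n2 i; simp
  | cons c t ih =>
    intro n1 n2 i
    rw [List.foldl_cons, inner_eq, ih, List.flatMap_cons, PySem.List.enumerate_append,
        List.foldl_append]
    simp only [Prod.mk.injEq]
    refine ⟨trivial, trivial, ?_⟩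
    push_cast [List.length_append]; ring

-- lifting the Str-level fold to the Chars level, for any table of 1-char patterns
theorem str_fold_toList (kvs : List (Char × String)) :
    ∀ ns : String,
      ((kvs.map (fun kv => (String.singleton kv.1, kv.2))).foldl
          (fun ns kv => PySem.Str.replace ns kv.1 kv.2) ns).toList =
        kvs.foldl (fun l kv => PySem.Chars.replace l [kv.1] kv.2.toList) ns.toList := by
  induction kvs with
  | nil => intro ns; rfl
  | cons kv r ih =>
    intro ns
    simp only [List.map_cons, List.foldl_cons, ih, PySem.Str.toList_replace,
      String.toList_singleton]

set_option maxRecDepth 4000 in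
theorem items_dvDict :
    PySem.Dict.items dvDict = dvTableC.map (fun kv => (String.singleton kv.1, kv.2)) := by rfl

-- A's chain of Str.replace passes, on the character level
theorem numbers_toList (p : String) :
    ((PySem.Dict.items dvDict).foldl (fun ns kv => PySem.Str.replace ns kv.1 kv.2) p).toList =
      p.toList.flatMap (dvExpand dvTableC) := by
  rw [items_dvDict, str_fold_toList, chain_eq dvTableC dvTableC_sound p.toList]

theorem dvExpand_eq (c : Char) :
    dvExpand dvTableC c = ((PySem.Dict.get? dvDictC c).getD (String.singleton c)).toList := rfl

-- ===== VERDICT (by name: the statement is the Claim_ definition above) =====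
theorem dv_spec : Claim_equal_dv := by
  unfold Claim_equal_dv
  intro patente _ _
  simp only [Spec_dv, dv, dv_alt]
  rw [numbers_toList]
  have := outer_eq (dvExpand dvTableC)
    (PySem.Str.replace (PySem.Str.replace (PySem.Str.upper patente) " " "") "-" "").toList 0 0 0
  simp only [dvExpand_eq] at this
  rw [this]
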